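-- pv_equiv track=rewrite | github.com/odysie/BERT_QA_from_TEmat_database | code/utils.py | recover_leading_spaces
-- ===== SOURCE A (Python) =====
-- def recover_leading_spaces(text, chars, start=0, current="", results=None):
--     """
--     Recursively insert spaces before specified characters in a string.
--
--     Args:
--         text (str): The original text to process.
--         chars (str): Characters before which spaces should be inserted.
--         start (int): The current index in the text being processed.
--         current (str): The current state of the processed text.
--         results (list): A list to collect the combinations.
--
--     Returns:
--         list: A list of combinations with spaces inserted before specified characters.
--     """
--     if results is None:
--         results = [text]
--
--     if start >= len(text) or len(results) >= 10:
--         if len(results) < 10: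
--             results.append(current)
--         return results
--
--     if text[start] in chars:
--         if len(results) < 10:
--             if start > 0:
--                 recover_leading_spaces(text, chars, start + 1, current + " " + text[start], results)
--             if len(results) < 10:
--                 recover_leading_spaces(text, chars, start + 1, current + text[start], results)
--     else:
--         recover_leading_spaces(text, chars, start + 1, current + text[start], results)
--
--     return results
-- ===== SOURCE B (Python) =====
-- def recover_leading_spaces(text, chars, start=0, current="", results=None):
--     """Iterative depth-first version using an explicit stack (same results, no recursion)."""
--     if results is None:
--         results = [text]
--     stack = [(start, current)]
--     while stack:
--         s, cur = stack.pop()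
--         if len(results) >= 10:
--             continue
--         if s >= len(text):
--             results.append(cur)
--         elif text[s] in chars:
--             stack.append((s + 1, cur + text[s]))
--             if s > 0:
--                 stack.append((s + 1, cur + " " + text[s]))
--         else:
--             stack.append((s + 1, cur + text[s]))
--     return results
-- ===== Notes on version B (the rewrite author's own statement) =====
-- stated objective: alternative
-- what changed: Replaces the mutating branch-guarded recursion with an explicit LIFO stack loop (iterative DFS) that re-checks the 10-result cap at each popped frame.
import Mathlib
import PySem

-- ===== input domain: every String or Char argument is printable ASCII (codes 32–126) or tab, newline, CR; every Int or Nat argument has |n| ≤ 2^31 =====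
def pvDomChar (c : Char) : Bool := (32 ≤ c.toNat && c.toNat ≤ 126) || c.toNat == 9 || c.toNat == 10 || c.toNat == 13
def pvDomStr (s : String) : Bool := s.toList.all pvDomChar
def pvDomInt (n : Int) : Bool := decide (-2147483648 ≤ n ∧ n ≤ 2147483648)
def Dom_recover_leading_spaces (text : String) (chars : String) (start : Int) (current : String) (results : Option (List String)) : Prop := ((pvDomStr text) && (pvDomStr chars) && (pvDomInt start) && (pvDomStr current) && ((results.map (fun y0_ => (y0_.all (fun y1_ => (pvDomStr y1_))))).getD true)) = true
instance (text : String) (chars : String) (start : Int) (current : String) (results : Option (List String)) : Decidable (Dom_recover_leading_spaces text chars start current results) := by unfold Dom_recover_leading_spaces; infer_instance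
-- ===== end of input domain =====

-- B replaces the branch-guarded recursion by an explicit LIFO stack loop (same return value);
-- both A and B mutate a caller-supplied results list in place; the equivalence proved is about the return value.

-- weight/measure definitions and termination lemmas the ports cite by name
-- (proof terms kept small by hand: these lemmas are reachable from the ports' bodies)
def pvW (L s : Int) : Nat := 3 ^ ((L - s).toNat)
def pvMeasure (L : Int) (stack : List (Int × String)) : Nat := (stack.map (fun f => pvW L f.1)).sum
lemma pvSub_lt (L s : Int) (h : ¬ L ≤ s) : (L - (s + 1)).toNat < (L - s).toNat :=
  (Int.toNat_lt_toNat (Int.sub_pos.mpr (Int.not_le.mp h))).mpr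
    (sub_lt_sub_left (lt_add_one s) L)
lemma pvDecA (L s : Int) (m : Nat) (h : ¬(L ≤ s ∨ 10 ≤ m)) : (L - (s + 1)).toNat < (L - s).toNat :=
  pvSub_lt L s (fun hl => h (Or.inl hl))
lemma pvW_pos (L s : Int) : 0 < pvW L s := Nat.pow_pos (by decide)
lemma pvW_lt (L s : Int) (h : ¬ L ≤ s) : pvW L (s + 1) < pvW L s :=
  Nat.pow_lt_pow_right (by decide) (pvSub_lt L s h)
lemma pvSub_succ (L s : Int) (h : ¬ L ≤ s) : (L - s).toNat = (L - (s + 1)).toNat + 1 := by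
  rw [show L - s = (L - (s + 1)) + 1 from by ring,
    Int.toNat_add (Int.sub_nonneg.mpr (Int.add_one_le_iff.mpr (Int.not_le.mp h))) (by decide)]
  rfl
lemma pvW_succ (L s : Int) (h : ¬ L ≤ s) : pvW L s = 3 * pvW L (s + 1) := by
  unfold pvW
  rw [pvSub_succ L s h, pow_succ, Nat.mul_comm]
lemma pvDec_skip (L s : Int) (cur : String) (rest : List (Int × String)) :
    pvMeasure L rest < pvMeasure L ((s, cur) :: rest) := by
  unfold pvMeasure
  rw [List.map_cons, List.sum_cons]
  exact Nat.lt_add_of_pos_left (pvW_pos L s)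
lemma pvDec_push1 (L s : Int) (b cur : String) (rest : List (Int × String)) (h : ¬ L ≤ s) :
    pvMeasure L ((s + 1, b) :: rest) < pvMeasure L ((s, cur) :: rest) := by
  unfold pvMeasure
  rw [List.map_cons, List.sum_cons, List.map_cons, List.sum_cons]
  exact Nat.add_lt_add_right (pvW_lt L s h) _
lemma pvDec_push2 (L s : Int) (a b cur : String) (rest : List (Int × String)) (h : ¬ L ≤ s) :
    pvMeasure L ((if 0 < s then [((s + 1 : Int), a)] else []) ++ (s + 1, b) :: rest) <
      pvMeasure L ((s, cur) :: rest) := by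
  unfold pvMeasure
  rw [List.map_append, List.sum_append, List.map_cons, List.sum_cons, List.map_cons, List.sum_cons]
  rw [pvW_succ L s h]
  have hstep : (List.map (fun f => pvW L f.1) (if 0 < s then [((s + 1 : Int), a)] else [])).sum
      ≤ pvW L (s + 1) := by
    split
    · rw [List.map_cons, List.sum_cons, List.map_nil, List.sum_nil]
      exact Nat.le_refl _
    · rw [List.map_nil, List.sum_nil]
      exact Nat.zero_le _
  calc (List.map (fun f => pvW L f.1) (if 0 < s then [((s + 1 : Int), a)] else [])).sum
        + (pvW L (s + 1) + (List.map (fun f => pvW L f.1) rest).sum)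
      ≤ pvW L (s + 1) + (pvW L (s + 1) + (List.map (fun f => pvW L f.1) rest).sum) :=
        Nat.add_le_add_right hstep _
    _ < pvW L (s + 1) + (pvW L (s + 1) + (pvW L (s + 1) + (List.map (fun f => pvW L f.1) rest).sum)) :=
        Nat.add_lt_add_left (Nat.add_lt_add_left (Nat.lt_add_of_pos_left (pvW_pos L (s + 1))) _) _
    _ = 3 * pvW L (s + 1) + (List.map (fun f => pvW L f.1) rest).sum := by ring

-- ===== PORT A =====
-- The recursive body of A, with the mutated `results` threaded functionally.
-- On text[start] raising IndexError (start < -len(text), excluded by Pre_) the port returns `results`.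
def rlsAuxA (text : String) (chars : String) (start : Int) (current : String) (results : List String) : List String :=
  if (text.toList.length : Int) ≤ start ∨ 10 ≤ results.length then
    if results.length < 10 then results ++ [current] else results
  else
    match PySem.List.pyGet? text.toList start with
    | none => results
    | some ch =>
      if chars.toList.contains ch then
        if results.length < 10 then
          let r1 := if 0 < start then
              rlsAuxA text chars (start + 1) (current ++ " " ++ ch.toString) results
            else results
          if r1.length < 10 then rlsAuxA text chars (start + 1) (current ++ ch.toString) r1
          else r1
        else results
      else rlsAuxA text chars (start + 1) (current ++ ch.toString) results
termination_by ((text.toList.length : Int) - start).toNat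
decreasing_by all_goals exact pvDecA _ _ _ (by assumption)

def recover_leading_spaces (text : String) (chars : String) (start : Int) (current : String) (results : Option (List String)) : List String :=
  rlsAuxA text chars start current (results.getD [text])

-- ===== PORT B =====
-- The while-loop of B over an explicit stack of (index, current) frames.
-- On text[s] raising IndexError (outside Pre_) the port continues with the rest of the stack.
def rlsLoopB (text : String) (chars : String) (stack : List (Int × String)) (results : List String) : List String :=
  match stack with
  | [] => results
  | (s, cur) :: rest =>
    if 10 ≤ results.length then rlsLoopB text chars rest results
    else if (text.toList.length : Int) ≤ s then rlsLoopB text chars rest (results ++ [cur])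
    else
      (PySem.List.pyGet? text.toList s).elim (rlsLoopB text chars rest results) (fun ch =>
        if chars.toList.contains ch then
          rlsLoopB text chars
            ((if 0 < s then [((s + 1 : Int), cur ++ " " ++ ch.toString)] else []) ++
              ((s + 1, cur ++ ch.toString) :: rest)) results
        else rlsLoopB text chars ((s + 1, cur ++ ch.toString) :: rest) results)
termination_by pvMeasure (text.toList.length : Int) stack
decreasing_by
  · exact pvDec_skip _ _ _ _
  · exact pvDec_skip _ _ _ _
  · exact pvDec_skip _ _ _ _
  · exact pvDec_push2 _ _ _ _ _ _ (by assumption)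
  · exact pvDec_push1 _ _ _ _ _ (by assumption)

def recover_leading_spaces_alt (text : String) (chars : String) (start : Int) (current : String) (results : Option (List String)) : List String :=
  rlsLoopB text chars [(start, current)] (results.getD [text])

-- ===== PRECONDITION & SPEC =====
-- Pre_ excludes exactly the inputs on which Python A raises IndexError: start below -len(text)
-- while the results list is not already full (B raises the same IndexError there).
def Pre_recover_leading_spaces (text : String) (chars : String) (start : Int) (current : String) (results : Option (List String)) : Prop :=
  -(text.toList.length : Int) ≤ start ∨ 10 ≤ (results.getD []).length
instance (text : String) (chars : String) (start : Int) (current : String) (results : Option (List String)) : Decidable (Pre_recover_leading_spaces text chars start current results) := by unfold Pre_recover_leading_spaces; infer_instance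

def pvWitness_recover_leading_spaces : String × String × Int × String × Option (List String) := ("a.b", ".", 0, "", none)

def Spec_recover_leading_spaces (text : String) (chars : String) (start : Int) (current : String) (results : Option (List String)) (out : List String) : Prop := out = recover_leading_spaces_alt text chars start current results
instance (text : String) (chars : String) (start : Int) (current : String) (results : Option (List String)) (out : List String) : Decidable (Spec_recover_leading_spaces text chars start current results out) := by unfold Spec_recover_leading_spaces; infer_instance

-- ===== CLAIM (what is proved, stated in full; the proofs are below) =====
def Claim_equal_recover_leading_spaces : Prop := ∀ (text : String) (chars : String) (start : Int) (current : String) (results : Option (List String)), Dom_recover_leading_spaces text chars start current results → Pre_recover_leading_spaces text chars start current results → Spec_recover_leading_spaces text chars start current results (recover_leading_spaces text chars start current results)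

-- ===== LEMMAS AND PROOFS =====

-- A call on an already-full results list returns it unchanged.
lemma rlsAuxA_full (text chars : String) (start : Int) (current : String) (results : List String)
    (h : 10 ≤ results.length) : rlsAuxA text chars start current results = results := by
  rw [rlsAuxA]
  have h' : ¬ results.length < 10 := by omega
  simp [h, h']

-- Processing the top frame of the stack is exactly one recursive call of A.
lemma rlsLoopB_cons (text chars : String) :
    ∀ (n : Nat) (s : Int) (cur : String) (rest : List (Int × String)) (r : List String),
      ((text.toList.length : Int) - s).toNat ≤ n →
      rlsLoopB text chars ((s, cur) :: rest) r = rlsLoopB text chars rest (rlsAuxA text chars s cur r) := by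
  intro n
  induction n with
  | zero =>
    intro s cur rest r hn
    have hs : (text.toList.length : Int) ≤ s := by omega
    rw [rlsLoopB, rlsAuxA]
    by_cases h10 : 10 ≤ r.length
    · rw [if_pos h10, if_pos (Or.inr h10), if_neg (by omega)]
    · rw [if_neg h10, if_pos hs, if_pos (Or.inl hs), if_pos (by omega)]
  | succ n ih =>
    intro s cur rest r hn
    rw [rlsLoopB, rlsAuxA]
    by_cases h10 : 10 ≤ r.length
    · rw [if_pos h10, if_pos (Or.inr h10), if_neg (by omega)]
    · by_cases hs : (text.toList.length : Int) ≤ s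
      · rw [if_neg h10, if_pos hs, if_pos (Or.inl hs), if_pos (by omega)]
      · rw [if_neg h10, if_neg hs, if_neg (by tauto)]
        cases hg : PySem.List.pyGet? text.toList s with
        | none => rfl
        | some ch =>
          simp only [Option.elim]
          have hchild : ((text.toList.length : Int) - (s + 1)).toNat ≤ n := by omega
          have hr : r.length < 10 := by omega
          by_cases hin : chars.toList.contains ch = true
          · rw [if_pos hin, if_pos hin, if_pos hr]
            by_cases hpos : 0 < s
            · rw [if_pos hpos, if_pos hpos, List.singleton_append]
              rw [ih (s + 1) (cur ++ " " ++ ch.toString) ((s + 1, cur ++ ch.toString) :: rest) r hchild]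
              rw [ih (s + 1) (cur ++ ch.toString) rest _ hchild]
              by_cases hf : (rlsAuxA text chars (s + 1) (cur ++ " " ++ ch.toString) r).length < 10
              · rw [if_pos hf]
              · rw [if_neg hf, rlsAuxA_full _ _ _ _ _ (by omega)]
            · rw [if_neg hpos, if_neg hpos, List.nil_append]
              rw [ih (s + 1) (cur ++ ch.toString) rest r hchild, if_pos hr]
          · rw [if_neg hin, if_neg hin]
            rw [ih (s + 1) (cur ++ ch.toString) rest r hchild]

-- ===== VERDICT (by name: the statement is the Claim_ definition above) =====
theorem recover_leading_spaces_spec : Claim_equal_recover_leading_spaces := by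
  intro text chars start current results _ _
  unfold Spec_recover_leading_spaces recover_leading_spaces recover_leading_spaces_alt
  rw [rlsLoopB_cons text chars (((text.toList.length : Int) - start).toNat) start current []
      (results.getD [text]) le_rfl]
  rw [rlsLoopB]
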